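-- pv_equiv track=rewrite | github.com/cmbrandenburg/adventofcode | day11.py | find_mod
-- ===== SOURCE A (Python) =====
-- def find_mod(n):
--     assert 0 < n
--     p = 0
--     base = 10
--     mod = 1
--     while base <= n:
--         p += 1
--         base *= 10
--         if p % 2 == 1:
--             mod *= 10
--     return p % 2 == 1, mod
-- ===== SOURCE B (Python) =====
-- def find_mod(n):
--     assert 0 < n
--     d = len(str(n))
--     return d % 2 == 0, 10 ** (d // 2)
-- ===== Notes on version B (the rewrite author's own statement) =====
-- stated objective: simpler
-- what changed: Replaces the iterative power-of-ten loop by a closed form over the decimal digit count d of n: evenness of d, together with ten raised to half of d.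
import Mathlib
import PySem

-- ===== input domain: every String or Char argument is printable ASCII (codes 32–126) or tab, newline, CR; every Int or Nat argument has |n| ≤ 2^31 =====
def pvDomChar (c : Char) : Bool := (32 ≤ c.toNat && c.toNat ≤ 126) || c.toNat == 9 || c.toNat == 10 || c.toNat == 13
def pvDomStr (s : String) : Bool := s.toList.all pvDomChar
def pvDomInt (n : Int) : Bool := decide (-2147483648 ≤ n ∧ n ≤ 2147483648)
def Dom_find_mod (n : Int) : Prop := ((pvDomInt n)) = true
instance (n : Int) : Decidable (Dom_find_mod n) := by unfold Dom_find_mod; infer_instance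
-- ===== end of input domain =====

-- B replaces A's power-of-ten loop by a closed form over the digit count d = len(str(n)); objective: simpler.

-- ===== PORT A =====
-- the while loop, with fuel n.toNat + 1 (≥ the number of iterations for every n the
-- loop runs on, since the iteration count k satisfies k < 10 ^ k ≤ n); the fuel-0
-- result coincides with the loop's exit value, so the guard only makes it total
def findModLoop (fuel : Nat) (n base p mod : Int) : Bool × Int :=
  match fuel with
  | 0 => (decide (PySem.Int.mod p 2 = 1), mod)
  | f + 1 =>
    if base ≤ n then
      findModLoop f n (base * 10) (p + 1)
        (if PySem.Int.mod (p + 1) 2 = 1 then mod * 10 else mod)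
    else (decide (PySem.Int.mod p 2 = 1), mod)

def find_mod (n : Int) : Bool × Int := findModLoop (n.toNat + 1) n 10 0 1

-- ===== PORT B =====
def find_mod_alt (n : Int) : Bool × Int :=
  (decide (PySem.Int.mod (PySem.Str.len (PySem.Int.toStr n)) 2 = 0),
   10 ^ (PySem.Int.floordiv (PySem.Str.len (PySem.Int.toStr n)) 2).toNat)

-- ===== PRECONDITION & SPEC =====
-- Pre_ excludes exactly the inputs n ≤ 0, on which A's 'assert 0 < n' raises AssertionError
def Pre_find_mod (n : Int) : Prop := 0 < n
instance (n : Int) : Decidable (Pre_find_mod n) := by unfold Pre_find_mod; infer_instance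
def pvWitness_find_mod : Int := (7)

def Spec_find_mod (n : Int) (out : Bool × Int) : Prop := out = find_mod_alt n
instance (n : Int) (out : Bool × Int) : Decidable (Spec_find_mod n out) := by unfold Spec_find_mod; infer_instance

-- ===== CLAIM (what is proved, stated in full; the proofs are below) =====
def Claim_equal_find_mod : Prop := ∀ (n : Int), Dom_find_mod n → Pre_find_mod n → Spec_find_mod n (find_mod n)

-- ===== LEMMAS AND PROOFS =====

-- exact length of Nat.toDigits (Mathlib's Nat.toDigits_length is only an upper bound)
lemma toDigitsCore_len_eq (f : Nat) : ∀ n : Nat, n < f →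
    (Nat.toDigitsCore 10 f n []).length = Nat.log 10 n + 1 := by
  induction f with
  | zero => omega
  | succ f ih =>
    intro n hn
    rw [Nat.toDigitsCore]
    by_cases h : n / 10 = 0
    · have h10 : n < 10 := by omega
      rw [if_pos h]
      simp [Nat.log_eq_zero_iff.2 (Or.inl h10)]
    · have h10 : 10 ≤ n := by omega
      have hlt : n / 10 < f := lt_of_lt_of_le (Nat.div_lt_self (by omega) (by norm_num)) (by omega)
      rw [if_neg h, Nat.toDigitsCore_lens_eq, ih (n / 10) hlt,
        Nat.log_of_one_lt_of_le (b := 10) (n := n) (by norm_num) h10]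

lemma toDigits_len_eq (n : Nat) : (Nat.toDigits 10 n).length = Nat.log 10 n + 1 :=
  toDigitsCore_len_eq (n + 1) n (by omega)

lemma findModLoop_exit (f : Nat) (n base p mod : Int) (h : n < base) :
    findModLoop f n base p mod = (decide (PySem.Int.mod p 2 = 1), mod) := by
  cases f with
  | zero => rfl
  | succ f => rw [findModLoop, if_neg (not_le.2 h)]

lemma findModLoop_step (f : Nat) (n base p mod : Int) (hf : 0 < f) (h : base ≤ n) :
    findModLoop f n base p mod =
      findModLoop (f - 1) n (base * 10) (p + 1)
        (if PySem.Int.mod (p + 1) 2 = 1 then mod * 10 else mod) := by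
  obtain ⟨f', rfl⟩ : ∃ f', f = f' + 1 := ⟨f - 1, by omega⟩
  rw [findModLoop, if_pos h]
  rfl

lemma alt_eval (n : Int) (k : Nat) (h1 : (10 : Int) ^ k ≤ n) (h2 : n < (10 : Int) ^ (k + 1)) :
    find_mod_alt n = (decide ((k + 1) % 2 = 0), (10 : Int) ^ ((k + 1) / 2)) := by
  have hn : 0 < n := lt_of_lt_of_le (by positivity) h1
  have e1 : ((10 ^ k : Nat) : Int) = (10 : Int) ^ k := by push_cast; ring
  have e2 : ((10 ^ (k + 1) : Nat) : Int) = (10 : Int) ^ (k + 1) := by push_cast; ring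
  have hA : (10 : Nat) ^ k ≤ n.toNat := by omega
  have hB : n.toNat < (10 : Nat) ^ (k + 1) := by omega
  have hlog : Nat.log 10 n.toNat = k := Nat.log_eq_of_pow_le_of_lt_pow hA hB
  have hlen : (PySem.Int.toChars n).length = k + 1 := by
    simp [PySem.Int.toChars, not_lt.2 (le_of_lt hn), toDigits_len_eq, hlog]
  have hm : PySem.Int.mod ((k + 1 : Nat) : Int) 2 = (((k + 1) % 2 : Nat) : Int) := by
    exact_mod_cast PySem.Int.mod_natCast (k + 1) 2
  have hf : PySem.Int.floordiv ((k + 1 : Nat) : Int) 2 = (((k + 1) / 2 : Nat) : Int) := by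
    exact_mod_cast PySem.Int.floordiv_natCast (k + 1) 2
  unfold find_mod_alt
  rw [PySem.Str.len_eq, PySem.Int.toList_toStr, hlen]
  push_cast at hm hf ⊢
  rw [hm, hf]
  simp
  omega

-- ===== VERDICT (by name: the statement is the Claim_ definition above) =====
theorem find_mod_spec : Claim_equal_find_mod := by
  intro n hdom hpre
  unfold Spec_find_mod
  unfold Pre_find_mod at hpre
  simp only [Dom_find_mod, pvDomInt, decide_eq_true_eq] at hdom
  obtain ⟨-, hub⟩ := hdom
  have hcase : n < 10 ∨ (10 ≤ n ∧ n < 100) ∨ (100 ≤ n ∧ n < 1000) ∨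
      (1000 ≤ n ∧ n < 10000) ∨ (10000 ≤ n ∧ n < 100000) ∨
      (100000 ≤ n ∧ n < 1000000) ∨ (1000000 ≤ n ∧ n < 10000000) ∨
      (10000000 ≤ n ∧ n < 100000000) ∨ (100000000 ≤ n ∧ n < 1000000000) ∨
      (1000000000 ≤ n ∧ n < 10000000000) := by omega
  rcases hcase with h2 | ⟨h1, h2⟩ | ⟨h1, h2⟩ | ⟨h1, h2⟩ | ⟨h1, h2⟩ | ⟨h1, h2⟩ |
    ⟨h1, h2⟩ | ⟨h1, h2⟩ | ⟨h1, h2⟩ | ⟨h1, h2⟩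
  · rw [alt_eval n 0 (by omega) (by omega)]
    unfold find_mod
    rw [findModLoop_exit _ _ _ _ _ (by omega)]
    decide
  · rw [alt_eval n 1 (by omega) (by omega)]
    unfold find_mod
    rw [findModLoop_step _ _ _ _ _ (by omega) (by omega),
      findModLoop_exit _ _ _ _ _ (by omega)]
    decide
  · rw [alt_eval n 2 (by omega) (by omega)]
    unfold find_mod
    rw [findModLoop_step _ _ _ _ _ (by omega) (by omega),
      findModLoop_step _ _ _ _ _ (by omega) (by omega),
      findModLoop_exit _ _ _ _ _ (by omega)]
    decide
  · rw [alt_eval n 3 (by omega) (by omega)]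
    unfold find_mod
    rw [findModLoop_step _ _ _ _ _ (by omega) (by omega),
      findModLoop_step _ _ _ _ _ (by omega) (by omega),
      findModLoop_step _ _ _ _ _ (by omega) (by omega),
      findModLoop_exit _ _ _ _ _ (by omega)]
    decide
  · rw [alt_eval n 4 (by omega) (by omega)]
    unfold find_mod
    rw [findModLoop_step _ _ _ _ _ (by omega) (by omega),
      findModLoop_step _ _ _ _ _ (by omega) (by omega),
      findModLoop_step _ _ _ _ _ (by omega) (by omega),
      findModLoop_step _ _ _ _ _ (by omega) (by omega),
      findModLoop_exit _ _ _ _ _ (by omega)]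
    decide
  · rw [alt_eval n 5 (by omega) (by omega)]
    unfold find_mod
    rw [findModLoop_step _ _ _ _ _ (by omega) (by omega),
      findModLoop_step _ _ _ _ _ (by omega) (by omega),
      findModLoop_step _ _ _ _ _ (by omega) (by omega),
      findModLoop_step _ _ _ _ _ (by omega) (by omega),
      findModLoop_step _ _ _ _ _ (by omega) (by omega),
      findModLoop_exit _ _ _ _ _ (by omega)]
    decide
  · rw [alt_eval n 6 (by omega) (by omega)]
    unfold find_mod
    rw [findModLoop_step _ _ _ _ _ (by omega) (by omega),
      findModLoop_step _ _ _ _ _ (by omega) (by omega),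
      findModLoop_step _ _ _ _ _ (by omega) (by omega),
      findModLoop_step _ _ _ _ _ (by omega) (by omega),
      findModLoop_step _ _ _ _ _ (by omega) (by omega),
      findModLoop_step _ _ _ _ _ (by omega) (by omega),
      findModLoop_exit _ _ _ _ _ (by omega)]
    decide
  · rw [alt_eval n 7 (by omega) (by omega)]
    unfold find_mod
    rw [findModLoop_step _ _ _ _ _ (by omega) (by omega),
      findModLoop_step _ _ _ _ _ (by omega) (by omega),
      findModLoop_step _ _ _ _ _ (by omega) (by omega),
      findModLoop_step _ _ _ _ _ (by omega) (by omega),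
      findModLoop_step _ _ _ _ _ (by omega) (by omega),
      findModLoop_step _ _ _ _ _ (by omega) (by omega),
      findModLoop_step _ _ _ _ _ (by omega) (by omega),
      findModLoop_exit _ _ _ _ _ (by omega)]
    decide
  · rw [alt_eval n 8 (by omega) (by omega)]
    unfold find_mod
    rw [findModLoop_step _ _ _ _ _ (by omega) (by omega),
      findModLoop_step _ _ _ _ _ (by omega) (by omega),
      findModLoop_step _ _ _ _ _ (by omega) (by omega),
      findModLoop_step _ _ _ _ _ (by omega) (by omega),
      findModLoop_step _ _ _ _ _ (by omega) (by omega),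
      findModLoop_step _ _ _ _ _ (by omega) (by omega),
      findModLoop_step _ _ _ _ _ (by omega) (by omega),
      findModLoop_step _ _ _ _ _ (by omega) (by omega),
      findModLoop_exit _ _ _ _ _ (by omega)]
    decide
  · rw [alt_eval n 9 (by omega) (by omega)]
    unfold find_mod
    rw [findModLoop_step _ _ _ _ _ (by omega) (by omega),
      findModLoop_step _ _ _ _ _ (by omega) (by omega),
      findModLoop_step _ _ _ _ _ (by omega) (by omega),
      findModLoop_step _ _ _ _ _ (by omega) (by omega),
      findModLoop_step _ _ _ _ _ (by omega) (by omega),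
      findModLoop_step _ _ _ _ _ (by omega) (by omega),
      findModLoop_step _ _ _ _ _ (by omega) (by omega),
      findModLoop_step _ _ _ _ _ (by omega) (by omega),
      findModLoop_step _ _ _ _ _ (by omega) (by omega),
      findModLoop_exit _ _ _ _ _ (by omega)]
    decide
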